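-- pv_equiv track=rewrite | github.com/anonymousfromano1-cell/propor2026 | utils/metrics.py | get_tuples
-- ===== SOURCE A (Python) =====
-- def get_tuples(tags, target):
--     """
--     Extrai spans (tuplas de início, fim) para um target específico.
--
--     Args:
--         tags: Lista de tags BIO
--         target: Tipo de entidade ('HOLDER', 'ASPECT', 'EXP')
--
--     Returns:
--         Conjunto de tuplas (início, fim, target)
--     """
--     spans = []
--     start = None
--
--     for i, tag in enumerate(tags):
--         if tag.startswith("B-" + target):
--             if start is not None:
--                 spans.append((start, i - 1, target))
--             start = i
--             if i + 1 < len(tags) and tags[i + 1].startswith("B-") and target not in tags[i + 1]: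
--                 spans.append((start, start, target))
--                 start = None
--                 continue
--
--         elif tag.startswith("I-" + target):
--             continue
--
--         else:
--             if start is not None:
--                 spans.append((start, i - 1, target))
--                 start = None
--
--     if start is not None:
--         spans.append((start, len(tags) - 1, target))
--     return set(spans)
-- ===== SOURCE B (Python) =====
-- def get_tuples(tags, target):
--     """Same spans as A, computed start-first: find every B- start, then
--     extend each span over the following I- run."""
--     bpre = "B-" + target
--     ipre = "I-" + target
--     starts = [i for i, t in enumerate(tags) if t.startswith(bpre)]
--     out = set()
--     for s in starts:
--         e = s
--         while e + 1 < len(tags) and tags[e + 1].startswith(ipre):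
--             e += 1
--         out.add((s, e, target))
--     return out
-- ===== Notes on version B (the rewrite author's own statement) =====
-- stated objective: simpler
-- what changed: Instead of A's single stateful scan (open-span variable, span-closing in three places, plus a dead lookahead branch), B first collects all B- start indices and then extends each start over its following I- run with a small while loop; the prefixes 'B-'+target and 'I-'+target are built once instead of being re-concatenated for every tag.
import Mathlib
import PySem

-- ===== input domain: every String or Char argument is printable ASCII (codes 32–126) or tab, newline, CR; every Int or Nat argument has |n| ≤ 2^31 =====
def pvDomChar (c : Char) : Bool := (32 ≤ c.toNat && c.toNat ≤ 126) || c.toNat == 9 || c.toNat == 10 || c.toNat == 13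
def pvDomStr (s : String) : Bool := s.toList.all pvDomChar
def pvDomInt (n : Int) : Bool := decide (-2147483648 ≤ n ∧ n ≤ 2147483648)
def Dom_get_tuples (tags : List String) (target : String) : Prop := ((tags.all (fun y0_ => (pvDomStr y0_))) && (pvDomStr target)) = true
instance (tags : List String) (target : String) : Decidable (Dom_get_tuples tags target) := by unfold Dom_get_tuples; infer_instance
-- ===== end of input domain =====

-- B replaces A's single stateful scan (open-span variable closed in three places, plus a
-- redundant lookahead branch) by: collect all B- start indices, then extend each over its I- run.

-- ===== PORT A =====
-- A's for-loop over enumerate(tags) as a recursion carrying (spans, start);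
-- `tags[i+1]` under the guard `i+1 < len(tags)` is PySem.List.pyGetD tags (i+1) "".
def get_tuples_loop (tags : List String) (target : String) :
    List (Int × String) → List (Int × Int × String) → Option Int →
    List (Int × Int × String) × Option Int
  | [], spans, start => (spans, start)
  | (i, tag) :: rest, spans, start =>
    if PySem.Str.startswith tag ("B-" ++ target) then
      let spans2 := match start with
        | some s => spans ++ [(s, i - 1, target)]
        | none => spans
      if i + 1 < (tags.length : Int) ∧
          PySem.Str.startswith (PySem.List.pyGetD tags (i + 1) "") "B-" = true ∧
          PySem.Str.isIn target (PySem.List.pyGetD tags (i + 1) "") = false then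
        get_tuples_loop tags target rest (spans2 ++ [(i, i, target)]) none
      else
        get_tuples_loop tags target rest spans2 (some i)
    else if PySem.Str.startswith tag ("I-" ++ target) then
      get_tuples_loop tags target rest spans start
    else
      match start with
      | some s => get_tuples_loop tags target rest (spans ++ [(s, i - 1, target)]) none
      | none => get_tuples_loop tags target rest spans none

def get_tuples (tags : List String) (target : String) : List (Int × Int × String) :=
  let (spans, start) :=
    get_tuples_loop tags target (PySem.List.enumerate tags) [] none
  let spans := match start with
    | some s => spans ++ [(s, (tags.length : Int) - 1, target)]
    | none => spans
  PySem.Set.ofList spans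

-- ===== PORT B =====
-- the `while e+1 < len(tags) and tags[e+1].startswith(ipre): e += 1` loop (e is a
-- nonnegative list index, so it is carried as a Nat; `tags[e+1]` = List.getD under the guard)
def get_tuples_ext (tags : List String) (ipre : String) (e : Nat) : Nat :=
  if e + 1 < tags.length ∧ PySem.Str.startswith (tags.getD (e + 1) "") ipre = true then
    get_tuples_ext tags ipre (e + 1)
  else e
termination_by tags.length - e

def get_tuples_alt (tags : List String) (target : String) : List (Int × Int × String) :=
  let bpre := "B-" ++ target
  let ipre := "I-" ++ target
  let starts : List Int :=
    ((PySem.List.enumerate tags).filter (fun p => PySem.Str.startswith p.2 bpre)).map (·.1)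
  starts.foldl
    (fun out s => PySem.Set.add out (s, (get_tuples_ext tags ipre s.toNat : Int), target))
    PySem.Set.empty

-- ===== PRECONDITION & SPEC =====
def Spec_get_tuples (tags : List String) (target : String) (out : List (Int × Int × String)) : Prop := out = get_tuples_alt tags target
instance (tags : List String) (target : String) (out : List (Int × Int × String)) : Decidable (Spec_get_tuples tags target out) := by unfold Spec_get_tuples; infer_instance

-- ===== CLAIM (what is proved, stated in full; the proofs are below) =====
def Claim_equal_get_tuples : Prop := ∀ (tags : List String) (target : String), Dom_get_tuples tags target → Spec_get_tuples tags target (get_tuples tags target)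

-- ===== LEMMAS AND PROOFS =====

-- A span builder shared by the proofs: the tuple B emits for a start index s
def pvF (tags : List String) (target : String) (s : Nat) : Int × Int × String :=
  ((s : Int), (get_tuples_ext tags ("I-" ++ target) s : Int), target)

-- the B- start indices from position k on
def pvStarts (tags : List String) (target : String) (k : Nat) : List Nat :=
  (List.range' k (tags.length - k)).filter
    (fun i => PySem.Str.startswith (tags.getD i "") ("B-" ++ target))

-- A's loop from position k with state st, including the final span-close
def pvRun (tags : List String) (target : String) (k : Nat) (st : Option Int) :
    List (Int × Int × String) :=
  let r := get_tuples_loop tags target (PySem.List.enumerate (tags.drop k) (k : Int)) [] st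
  r.1 ++ (match r.2 with
    | some s => [(s, (tags.length : Int) - 1, target)]
    | none => [])

theorem pv_startswith_prefix (t p : String) (h : PySem.Str.startswith t p = true) :
    p.toList <+: t.toList := by
  rw [PySem.Str.startswith_eq, PySem.Chars.startswith_iff] at h; exact h

theorem pv_head (t p : String) (c : Char) (h : PySem.Str.startswith t p = true)
    (hc : p.toList.head? = some c) : t.toList.head? = some c := by
  obtain ⟨r, e⟩ := pv_startswith_prefix _ _ h
  rw [← e]
  cases h' : p.toList with
  | nil => simp [h'] at hc
  | cons a l => simp [h'] at hc ⊢; simpa [h'] using hc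

-- a tag cannot start with both a "B-…" and an "I-…" prefix
theorem pv_no_BI (t : String) (u v : String)
    (hb : PySem.Str.startswith t ("B-" ++ u) = true)
    (hi : PySem.Str.startswith t ("I-" ++ v) = true) : False := by
  have h1 := pv_head t _ 'B' hb (by simp)
  have h2 := pv_head t _ 'I' hi (by simp)
  rw [h1] at h2; simp at h2

theorem pv_no_Bpre_I (t : String) (v : String)
    (hb : PySem.Str.startswith t "B-" = true)
    (hi : PySem.Str.startswith t ("I-" ++ v) = true) : False := by
  have h1 := pv_head t _ 'B' hb (by decide)
  have h2 := pv_head t _ 'I' hi (by simp)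
  rw [h1] at h2; simp at h2

theorem pv_ext_ge (tags : List String) (ip : String) (e : Nat) :
    e ≤ get_tuples_ext tags ip e := by
  fun_induction get_tuples_ext with
  | case1 e h ih => omega
  | case2 e h => omega

theorem pv_ext_lt (tags : List String) (ip : String) (e : Nat) (h : e < tags.length) :
    get_tuples_ext tags ip e < tags.length := by
  fun_induction get_tuples_ext with
  | case1 e h' ih => exact ih (by omega)
  | case2 e h' => omega

theorem pv_ext_eq_of_not (tags : List String) (ip : String) (e : Nat)
    (h : ¬ (e + 1 < tags.length ∧ PySem.Str.startswith (tags.getD (e + 1) "") ip = true)) :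
    get_tuples_ext tags ip e = e := by
  rw [get_tuples_ext, if_neg h]

theorem pv_ext_eq_succ (tags : List String) (ip : String) (e : Nat)
    (h : e + 1 < tags.length ∧ PySem.Str.startswith (tags.getD (e + 1) "") ip = true) :
    get_tuples_ext tags ip e = get_tuples_ext tags ip (e + 1) := by
  rw [get_tuples_ext, if_pos h]

-- every position the while loop steps over carries the I- prefix
theorem pv_ext_I (tags : List String) (ip : String) (e : Nat) :
    ∀ j, e < j → j ≤ get_tuples_ext tags ip e →
      PySem.Str.startswith (tags.getD j "") ip = true := by
  fun_induction get_tuples_ext with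
  | case1 e h ih =>
    intro j h1 h2
    rcases Nat.eq_or_lt_of_le (Nat.succ_le_of_lt h1) with h3 | h3
    · rw [← h3]; exact h.2
    · exact ih j h3 h2
  | case2 e h => intro j h1 h2; omega

-- appending to the spans accumulator commutes with running A's loop
theorem pv_loop_shift (tags : List String) (target : String) (l : List (Int × String)) :
    ∀ (spans : List (Int × Int × String)) (st : Option Int),
    get_tuples_loop tags target l spans st =
      (spans ++ (get_tuples_loop tags target l [] st).1,
       (get_tuples_loop tags target l [] st).2) := by
  induction l with
  | nil => intro spans st; simp [get_tuples_loop]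
  | cons p rest ih =>
    intro spans st
    obtain ⟨i, tag⟩ := p
    simp only [get_tuples_loop]
    split_ifs with h1 h2
    · cases st with
      | none => simp only []; rw [ih, ih ([] ++ [(i,i,target)])]; simp
      | some s => simp only []; rw [ih, ih ([] ++ [(s, i-1, target)] ++ [(i,i,target)])]; simp
    · cases st with
      | none => simp only []; rw [ih, ih []]
      | some s => simp only []; rw [ih, ih ([] ++ [(s, i-1, target)])]; simp
    · exact ih spans st
    · cases st with
      | none => exact ih spans none
      | some s => simp only []; rw [ih, ih ([] ++ [(s, i-1, target)])]; simp

-- one enumerate step of the suffix at position k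
theorem pv_enum_cons (tags : List String) (k : Nat) (hk : k < tags.length) :
    PySem.List.enumerate (tags.drop k) (k : Int) =
      ((k : Int), tags.getD k "") :: PySem.List.enumerate (tags.drop (k + 1)) ((k : Int) + 1) := by
  rw [List.drop_eq_getElem_cons hk, PySem.List.enumerate_cons, List.getD_eq_getElem tags "" hk]

-- one skipped position for the closed-span state
theorem pv_run_skip (tags : List String) (target : String) (k : Nat) (hk : k < tags.length)
    (hB : ¬ PySem.Str.startswith (tags.getD k "") ("B-" ++ target) = true) :
    pvRun tags target k none = pvRun tags target (k + 1) none := by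
  unfold pvRun
  rw [pv_enum_cons tags k hk]
  simp only [get_tuples_loop, if_neg hB]
  have hc : ((k : Int) + 1) = ((k + 1 : Nat) : Int) := by push_cast; ring
  rw [hc]
  split_ifs <;> rfl

-- skipping non-start positions does not change the start list
theorem pv_starts_skip (tags : List String) (target : String) (a : Nat)
    (hB : ¬ PySem.Str.startswith (tags.getD a "") ("B-" ++ target) = true) :
    pvStarts tags target a = pvStarts tags target (a + 1) := by
  unfold pvStarts
  by_cases ha : a < tags.length
  · have h1 : tags.length - a = (tags.length - (a + 1)) + 1 := by omega
    rw [h1, List.range'_succ, List.filter_cons_of_neg (by simpa using hB)]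
  · have h1 : tags.length - a = 0 := by omega
    have h2 : tags.length - (a + 1) = 0 := by omega
    rw [h1, h2]; rfl

theorem pv_starts_eq (tags : List String) (target : String) :
    ∀ d a, (∀ j, a ≤ j → j < a + d →
        ¬ PySem.Str.startswith (tags.getD j "") ("B-" ++ target) = true) →
      pvStarts tags target a = pvStarts tags target (a + d) := by
  intro d
  induction d with
  | zero => intro a _; rfl
  | succ d ih =>
    intro a h
    rw [pv_starts_skip tags target a (h a le_rfl (by omega))]
    have := ih (a + 1) (fun j h1 h2 => h j (by omega) (by omega))
    rw [this]; ring_nf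

-- the open-span state closes exactly at the end of the I- run
theorem pv_run_some (tags : List String) (target : String) :
    ∀ m e (sV : Int), tags.length - e ≤ m → e + 1 ≤ tags.length →
      pvRun tags target (e + 1) (some sV) =
        (sV, (get_tuples_ext tags ("I-" ++ target) e : Int), target) ::
          pvRun tags target (get_tuples_ext tags ("I-" ++ target) e + 1) none := by
  intro m
  induction m with
  | zero => intro e sV h1 h2; omega
  | succ m ih =>
    intro e sV h1 h2
    rcases Nat.eq_or_lt_of_le h2 with hn | hn
    · -- e + 1 = tags.length : the loop ends and the final close fires
      have hx : get_tuples_ext tags ("I-" ++ target) e = e :=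
        pv_ext_eq_of_not tags _ e (by omega)
      rw [hx]
      unfold pvRun
      have hd : tags.drop (e + 1) = [] := List.drop_eq_nil_iff.2 (by omega)
      rw [hd]
      simp only [PySem.List.enumerate_nil, get_tuples_loop, List.nil_append]
      have : ((tags.length : Int) - 1) = (e : Int) := by omega
      rw [this]
    · -- e + 1 < tags.length : case split on the tag at e + 1
      have hc1 : ((e + 1 : Nat) : Int) + 1 = ((e + 2 : Nat) : Int) := by push_cast; ring
      have hc0 : ((e + 1 : Nat) : Int) - 1 = (e : Int) := by push_cast; ring
      by_cases hB : PySem.Str.startswith (tags.getD (e + 1) "") ("B-" ++ target) = true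
      · -- a new B- start: the open span closes at e, then proceed as the closed state would
        have hx : get_tuples_ext tags ("I-" ++ target) e = e :=
          pv_ext_eq_of_not tags _ e (fun h => pv_no_BI _ _ _ hB h.2)
        rw [hx]
        unfold pvRun
        rw [pv_enum_cons tags (e + 1) hn]
        simp only [get_tuples_loop, if_pos hB]
        split_ifs with hLA
        · rw [pv_loop_shift tags target _ ([] ++ [(sV, ((e+1:Nat):Int) - 1, target)] ++
              [(((e+1:Nat):Int), ((e+1:Nat):Int), target)]) none,
            pv_loop_shift tags target _ ([] ++ [(((e+1:Nat):Int), ((e+1:Nat):Int), target)]) none]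
          simp
        · rw [pv_loop_shift tags target _ ([] ++ [(sV, ((e+1:Nat):Int) - 1, target)])
              (some ((e+1:Nat):Int)),
            pv_loop_shift tags target _ ([]) (some ((e+1:Nat):Int))]
          simp
      · by_cases hI : PySem.Str.startswith (tags.getD (e + 1) "") ("I-" ++ target) = true
        · -- inside the span: state unchanged, recurse
          have hx : get_tuples_ext tags ("I-" ++ target) e =
              get_tuples_ext tags ("I-" ++ target) (e + 1) :=
            pv_ext_eq_succ tags _ e ⟨hn, hI⟩
          rw [hx]
          have step : pvRun tags target (e + 1) (some sV) = pvRun tags target (e + 2) (some sV) := by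
            unfold pvRun
            rw [pv_enum_cons tags (e + 1) hn]
            simp only [get_tuples_loop, if_neg hB, if_pos hI]
            rw [hc1]
          rw [step]
          exact ih (e + 1) sV (by omega) (by omega)
        · -- the span ends at e: emit (sV, e) and continue closed
          have hx : get_tuples_ext tags ("I-" ++ target) e = e :=
            pv_ext_eq_of_not tags _ e (fun h => hI h.2)
          rw [hx]
          have step : pvRun tags target (e + 1) (some sV) =
              (sV, (e : Int), target) :: pvRun tags target (e + 2) none := by
            unfold pvRun
            rw [pv_enum_cons tags (e + 1) hn]
            simp only [get_tuples_loop, if_neg hB, if_neg hI]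
            rw [pv_loop_shift tags target _ ([] ++ [(sV, ((e+1:Nat):Int) - 1, target)]) none]
            simp only [hc0, List.nil_append, List.cons_append]
            rw [show e + 1 + 1 = e + 2 from by omega, hc1]
          rw [step, pv_run_skip tags target (e + 1) hn hB]

-- the master invariant: A's loop from k emits exactly B's spans for starts ≥ k
theorem pv_run_none (tags : List String) (target : String) :
    ∀ m k, tags.length - k ≤ m → k ≤ tags.length →
      pvRun tags target k none = (pvStarts tags target k).map (pvF tags target) := by
  intro m
  induction m with
  | zero =>
    intro k h1 h2
    have hk : k = tags.length := by omega
    subst hk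
    simp [pvRun, pvStarts, List.drop_eq_nil_iff.2 le_rfl, PySem.List.enumerate_nil,
      get_tuples_loop]
  | succ m ih =>
    intro k h1 h2
    rcases Nat.eq_or_lt_of_le h2 with hk | hk
    · subst hk
      simp [pvRun, pvStarts, List.drop_eq_nil_iff.2 le_rfl, PySem.List.enumerate_nil,
        get_tuples_loop]
    · have hc1 : ((k : Nat) : Int) + 1 = ((k + 1 : Nat) : Int) := by push_cast; ring
      by_cases hB : PySem.Str.startswith (tags.getD k "") ("B-" ++ target) = true
      · have hstarts : pvStarts tags target k = k :: pvStarts tags target (k + 1) := by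
          unfold pvStarts
          rw [show tags.length - k = (tags.length - (k + 1)) + 1 from by omega,
            List.range'_succ, List.filter_cons_of_pos (by simpa using hB)]
        rw [hstarts, List.map_cons]
        unfold pvRun
        rw [pv_enum_cons tags k hk]
        simp only [get_tuples_loop, if_pos hB]
        have hg : PySem.List.pyGetD tags ((k : Int) + 1) "" = tags.getD (k + 1) "" := by
          rw [hc1, PySem.List.pyGetD_natCast]
        split_ifs with hLA
        · -- A's lookahead branch: the next tag is a non-matching "B-", so the span is (k, k)
          have hx : get_tuples_ext tags ("I-" ++ target) k = k :=
            pv_ext_eq_of_not tags _ k (fun h => pv_no_Bpre_I _ _ (hg ▸ hLA.2.1) h.2)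
          rw [pv_loop_shift tags target _ ([] ++ [((k : Int), (k : Int), target)]) none, hc1]
          have htail := ih (k + 1) (by omega) (by omega)
          unfold pvRun at htail
          simp only [List.nil_append, List.cons_append, htail, pvF, hx]
        · -- no lookahead: the open-span state runs to the end of the I- run
          rw [hc1]
          have hrs := pv_run_some tags target tags.length k ((k : Int)) (by omega) (by omega)
          unfold pvRun at hrs
          rw [hrs]
          have hext1 : get_tuples_ext tags ("I-" ++ target) k + 1 ≤ tags.length :=
            pv_ext_lt tags _ k hk
          have hge : k ≤ get_tuples_ext tags ("I-" ++ target) k := pv_ext_ge tags _ k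
          have htail := ih (get_tuples_ext tags ("I-" ++ target) k + 1) (by omega) (by omega)
          unfold pvRun at htail
          rw [htail]
          have hst : pvStarts tags target (k + 1) =
              pvStarts tags target (get_tuples_ext tags ("I-" ++ target) k + 1) := by
            have hnoB : ∀ j, k + 1 ≤ j → j < k + 1 + (get_tuples_ext tags ("I-" ++ target) k - k) →
                ¬ PySem.Str.startswith (tags.getD j "") ("B-" ++ target) = true := by
              intro j hj1 hj2 hBj
              exact pv_no_BI _ _ _ hBj
                (pv_ext_I tags ("I-" ++ target) k j (by omega) (by omega))
            have := pv_starts_eq tags target (get_tuples_ext tags ("I-" ++ target) k - k) (k + 1) hnoB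
            rw [this, show k + 1 + (get_tuples_ext tags ("I-" ++ target) k - k) =
              get_tuples_ext tags ("I-" ++ target) k + 1 from by omega]
          rw [hst]
          rfl
      · rw [pv_run_skip tags target k hk hB, ih (k + 1) (by omega) (by omega),
          pv_starts_skip tags target k hB]

-- B's start-index comprehension equals the range'-filter form
theorem pv_bstarts (tags : List String) (target : String) :
    ∀ m k, tags.length - k ≤ m → k ≤ tags.length →
      ((PySem.List.enumerate (tags.drop k) (k : Int)).filter
          (fun p => PySem.Str.startswith p.2 ("B-" ++ target))).map (·.1) =
        (pvStarts tags target k).map (fun i : Nat => (i : Int)) := by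
  intro m
  induction m with
  | zero =>
    intro k h1 h2
    have hk : k = tags.length := by omega
    subst hk
    simp [pvStarts, PySem.List.enumerate_nil]
  | succ m ih =>
    intro k h1 h2
    rcases Nat.eq_or_lt_of_le h2 with hk | hk
    · subst hk; simp [pvStarts, PySem.List.enumerate_nil]
    · rw [pv_enum_cons tags k hk]
      have hc : ((k : Int) + 1) = ((k + 1 : Nat) : Int) := by push_cast; ring
      have hs : tags.length - k = (tags.length - (k + 1)) + 1 := by omega
      unfold pvStarts
      rw [hs, List.range'_succ]
      by_cases hB : PySem.Str.startswith (tags.getD k "") ("B-" ++ target) = true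
      · rw [List.filter_cons_of_pos (by simpa using hB),
          List.filter_cons_of_pos (by simpa using hB)]
        simp only [List.map_cons]
        rw [hc, ih (k + 1) (by omega) (by omega)]
        rfl
      · rw [List.filter_cons_of_neg (by simpa using hB),
          List.filter_cons_of_neg (by simpa using hB)]
        rw [hc, ih (k + 1) (by omega) (by omega)]
        rfl

theorem pv_A_eq (tags : List String) (target : String) :
    get_tuples tags target =
      PySem.Set.ofList ((pvStarts tags target 0).map (pvF tags target)) := by
  rw [← pv_run_none tags target tags.length 0 (by omega) (by omega)]
  unfold get_tuples pvRun
  simp only [List.drop_zero, Nat.cast_zero]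
  rcases h : (get_tuples_loop tags target (PySem.List.enumerate tags) [] none).2 with _ | sv <;>
    simp

theorem pv_B_eq (tags : List String) (target : String) :
    get_tuples_alt tags target =
      PySem.Set.ofList ((pvStarts tags target 0).map (pvF tags target)) := by
  unfold get_tuples_alt
  simp only []
  rw [← PySem.Set.update_map_eq_foldl_add,
    show (PySem.Set.empty : PySem.Set (Int × Int × String)) = [] from rfl,
    PySem.Set.update_nil_left]
  have hb := pv_bstarts tags target tags.length 0 (by omega) (by omega)
  rw [List.drop_zero, Nat.cast_zero] at hb
  rw [hb, List.map_map]
  exact congrArg PySem.Set.ofList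
    (List.map_congr_left (fun a _ => by simp [pvF, Function.comp]))

-- ===== VERDICT (by name: the statement is the Claim_ definition above) =====
theorem get_tuples_spec : Claim_equal_get_tuples := by
  intro tags target _
  unfold Spec_get_tuples
  rw [pv_A_eq, pv_B_eq]
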